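-- pv_equiv track=rewrite | github.com/joaonpsilva/ri_trabalho3 | src/Indexer.py | extractDocData
-- ===== SOURCE A (Python) =====
-- def extractDocData(tokens):
--     # count occurs and positions
--     # receives tokens
--     # returns dict, key=term, value=(occur, [positions])
--     tokensCount = {}
--     for ind in range(len(tokens)):
--         word = tokens[ind]
--
--         if word not in tokensCount:
--             tokensCount[word] = (1, [ind])
--         else:
--             info = tokensCount[word]
--             info[1].append(ind)
--             tokensCount[word] = (info[0] + 1, info[1])
--
--     return tokensCount
-- ===== SOURCE B (Python) =====
-- def extractDocData(tokens):
--     # count occurs and positions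
--     # for each distinct term (first-occurrence order), scan the whole token
--     # list once to collect its positions; count = length of that list
--     result = {}
--     for word in dict.fromkeys(tokens):
--         positions = [ind for ind in range(len(tokens)) if tokens[ind] == word]
--         result[word] = (len(positions), positions)
--     return result
-- ===== Notes on version B (the rewrite author's own statement) =====
-- stated objective: alternative
-- what changed: B inverts the traversal: instead of A's single pass over positions updating a (count, positions) tuple per word, B first computes the distinct terms in first-occurrence order (dict.fromkeys) and then, per term, scans all indices to collect that term's positions, deriving the count from the list length; it trades A's O(n) single pass for an O(n*k) per-term scan.
import Mathlib
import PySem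

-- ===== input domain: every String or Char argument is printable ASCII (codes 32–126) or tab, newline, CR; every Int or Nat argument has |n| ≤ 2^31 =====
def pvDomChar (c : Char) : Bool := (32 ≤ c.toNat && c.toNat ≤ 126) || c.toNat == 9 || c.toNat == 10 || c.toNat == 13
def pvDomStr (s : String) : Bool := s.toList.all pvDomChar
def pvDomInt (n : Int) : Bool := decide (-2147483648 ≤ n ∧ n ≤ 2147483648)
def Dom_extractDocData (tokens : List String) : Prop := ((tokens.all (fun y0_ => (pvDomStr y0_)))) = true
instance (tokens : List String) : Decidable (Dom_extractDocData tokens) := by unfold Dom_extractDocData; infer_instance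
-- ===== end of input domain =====

-- B inverts the traversal: one scan over all indices per distinct term (collected
-- first-occurrence order) instead of A's single positional pass maintaining
-- (count, positions) tuples (objective: alternative; B is not faster).

-- ===== PORT A =====
-- one-pass loop over indices maintaining a dict word -> (count, positions); the
-- reinsert after the in-place append is an overwrite, which keeps the key's
-- position, as Dict.insert does; tokens[ind] is always in range here (pyGetD exact)
def extractDocData (tokens : List String) : List (String × Int × List Int) :=
  ((PySem.List.pyRange 0 (PySem.List.len tokens)).foldl
    (fun d ind =>
      let word := PySem.List.pyGetD tokens ind ""
      if d.contains word = false then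
        d.insert word (1, [ind])
      else
        let info := d.getD word (0, [])                    -- key present in this branch
        d.insert word (info.1 + 1, info.2 ++ [ind]))
    PySem.Dict.empty).items

-- ===== PORT B =====
-- dict.fromkeys(tokens) = PySem.List.dedup; per distinct word, the list
-- comprehension over range(len(tokens)) is a filter of pyRange
def extractDocData_alt (tokens : List String) : List (String × Int × List Int) :=
  ((PySem.List.dedup tokens).foldl
    (fun d word =>
      let positions := (PySem.List.pyRange 0 (PySem.List.len tokens)).filter
        (fun ind => PySem.List.pyGetD tokens ind "" == word)
      d.insert word ((positions.length : Int), positions))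
    PySem.Dict.empty).items

-- ===== PRECONDITION & SPEC =====
def Spec_extractDocData (tokens : List String) (out : List (String × Int × List Int)) : Prop := out = extractDocData_alt tokens
instance (tokens : List String) (out : List (String × Int × List Int)) : Decidable (Spec_extractDocData tokens out) := by unfold Spec_extractDocData; infer_instance

-- ===== CLAIM (what is proved, stated in full; the proofs are below) =====
def Claim_equal_extractDocData : Prop := ∀ (tokens : List String), Dom_extractDocData tokens → Spec_extractDocData tokens (extractDocData tokens)

-- ===== LEMMAS AND PROOFS =====

-- pvLift lifts one entry of the positions-only dict to the corresponding entry of A's dict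
def pvLift (p : String × List Int) : String × Int × List Int := (p.1, (p.2.length : Int), p.2)

-- A's loop step commutes with lifting a positions dict through pvLift
theorem pvStep_comm (g : Int → String) (dB : PySem.Dict String (List Int)) (h : dB.keys.Nodup)
    (ind : Int) :
    (let word := g ind
     if (PySem.Dict.mk (dB.items.map pvLift)).contains word = false then
        (PySem.Dict.mk (dB.items.map pvLift)).insert word (1, [ind])
      else
        let info := (PySem.Dict.mk (dB.items.map pvLift)).getD word (0, [])
        (PySem.Dict.mk (dB.items.map pvLift)).insert word (info.1 + 1, info.2 ++ [ind]))
    = PySem.Dict.mk ((dB.modify (g ind) [] (· ++ [ind])).items.map pvLift) := by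
  set w := g ind with hw
  have hkeys : (PySem.Dict.mk (dB.items.map pvLift)).keys = dB.keys := by
    simp [PySem.Dict.keys, pvLift]
  have hcont : (PySem.Dict.mk (dB.items.map pvLift)).contains w = dB.contains w := by
    rw [PySem.Dict.contains_eq_decide_mem_keys, PySem.Dict.contains_eq_decide_mem_keys, hkeys]
  have hmod : dB.modify w [] (· ++ [ind]) = dB.insert w (dB.getD w [] ++ [ind]) := rfl
  rw [hmod]
  by_cases hc : dB.contains w = true
  · -- existing key: A replaces its tuple in place, B replaces its list in place
    have hsome : (dB.get? w).isSome := by rw [← PySem.Dict.contains_eq_isSome_get?]; exact hc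
    rcases Option.isSome_iff_exists.mp hsome with ⟨pos, hp⟩
    have hmem : (w, pos) ∈ dB.items := PySem.Dict.mem_items_of_get?_eq_some dB hp
    have hmemA : (w, ((pos.length : Int), pos)) ∈ (PySem.Dict.mk (dB.items.map pvLift)).items := by
      simpa [pvLift] using List.mem_map_of_mem (f := pvLift) hmem
    have hgetA : (PySem.Dict.mk (dB.items.map pvLift)).getD w (0, []) = ((pos.length : Int), pos) := by
      exact PySem.Dict.getD_of_mem_items _ hmemA (by rw [hkeys]; exact h) _
    have hgetB : dB.getD w [] = pos := PySem.Dict.getD_of_get?_eq_some dB [] hp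
    have hcA : (PySem.Dict.mk (dB.items.map pvLift)).contains w = true := by rw [hcont]; exact hc
    show (if (PySem.Dict.mk (dB.items.map pvLift)).contains w = false then _ else _) = _
    rw [if_neg (by simp [hcA])]
    apply PySem.Dict.ext_iff.mpr
    rw [PySem.Dict.items_insert_of_contains _ _ hcA,
        PySem.Dict.items_insert_of_contains _ _ hc]
    simp only [hgetA, hgetB]
    rw [List.map_map, List.map_map]
    apply List.map_congr_left
    intro p _
    by_cases hpw : p.1 = w
    · simp [pvLift, hpw]
    · simp [pvLift, hpw]
  · -- fresh key: both sides append a new entry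
    have hc' : dB.contains w = false := by simpa using hc
    have hcA : (PySem.Dict.mk (dB.items.map pvLift)).contains w = false := by rw [hcont]; exact hc'
    show (if (PySem.Dict.mk (dB.items.map pvLift)).contains w = false then _ else _) = _
    rw [if_pos (by simp [hcA])]
    apply PySem.Dict.ext_iff.mpr
    rw [PySem.Dict.items_insert_of_not_contains _ _ hcA,
        PySem.Dict.items_insert_of_not_contains _ _ hc']
    have : dB.getD w [] = [] := PySem.Dict.getD_of_not_contains dB [] hc'
    simp [this, pvLift]

-- A's whole loop equals the lift of the positions-only (modify/append) loop
theorem pvLoop_comm (g : Int → String) (l : List Int) (dB : PySem.Dict String (List Int))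
    (h : dB.keys.Nodup) :
    l.foldl
      (fun d ind =>
        let word := g ind
        if d.contains word = false then
          d.insert word (1, [ind])
        else
          let info := d.getD word (0, [])
          d.insert word (info.1 + 1, info.2 ++ [ind]))
      (PySem.Dict.mk (dB.items.map pvLift))
    = PySem.Dict.mk
        ((l.foldl (fun d ind => d.modify (g ind) [] (· ++ [ind])) dB).items.map pvLift) := by
  induction l generalizing dB with
  | nil => simp
  | cons ind rest ih =>
    simp only [List.foldl_cons]
    rw [pvStep_comm g dB h ind]
    exact ih _ (PySem.Dict.nodup_keys_foldl_modify_key [ind] g [] (fun _ i => (· ++ [i])) dB h)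

-- the positions-only loop's items: distinct words, each paired with its filtered index list
theorem pvPosItems (tokens : List String) :
    ((PySem.List.pyRange 0 (PySem.List.len tokens)).foldl
      (fun d ind => d.modify (PySem.List.pyGetD tokens ind "") [] (· ++ [ind]))
      PySem.Dict.empty).items
    = (PySem.Set.ofList tokens).map
        (fun w => (w, (PySem.List.pyRange 0 (PySem.List.len tokens)).filter
          (fun ind => PySem.List.pyGetD tokens ind "" == w))) := by
  set l := PySem.List.pyRange 0 (PySem.List.len tokens) with hl
  set g : Int → String := fun ind => PySem.List.pyGetD tokens ind "" with hg
  set posD := l.foldl (fun d ind => d.modify (g ind) [] (· ++ [ind])) PySem.Dict.empty with hpos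
  have hkeys : posD.keys = PySem.Set.ofList tokens := by
    rw [hpos, PySem.Dict.keys_foldl_modify_key l g [] (fun _ i => (· ++ [i]))]
    have : l.map g = tokens := PySem.List.map_pyGetD_pyRange_zero tokens ""
    rw [PySem.Dict.keys_empty, this]
    rfl
  have hnd : posD.keys.Nodup := by
    rw [hkeys]; exact PySem.Set.nodup_ofList tokens
  have hgetD : ∀ w, posD.getD w [] = l.filter (fun ind => g ind == w) := by
    intro w
    have hmap : posD = (l.map (fun i => (g i, i))).foldl
        (fun d p => d.modify p.1 [] (· ++ [p.2])) PySem.Dict.empty := by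
      rw [hpos, List.foldl_map]
    rw [hmap, PySem.Dict.getD_foldl_modify_append]
    rw [PySem.Dict.getD_empty, List.nil_append, List.filter_map]
    rw [List.map_map]
    simp [Function.comp_def]
  rw [PySem.Dict.items_eq_map_keys posD hnd [], hkeys]
  exact List.map_congr_left (fun w _ => by rw [hgetD w])

-- A's result as a map over the distinct words
theorem pvA_items (tokens : List String) :
    extractDocData tokens
    = (PySem.Set.ofList tokens).map
        (fun w => pvLift (w, (PySem.List.pyRange 0 (PySem.List.len tokens)).filter
          (fun ind => PySem.List.pyGetD tokens ind "" == w))) := by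
  unfold extractDocData
  have hempty : (PySem.Dict.empty : PySem.Dict String (Int × List Int))
      = PySem.Dict.mk (((PySem.Dict.empty : PySem.Dict String (List Int)).items).map pvLift) := rfl
  rw [hempty, pvLoop_comm (fun ind => PySem.List.pyGetD tokens ind "")
        (PySem.List.pyRange 0 (PySem.List.len tokens)) PySem.Dict.empty
        (by rw [PySem.Dict.keys_empty]; exact List.nodup_nil)]
  show ((PySem.List.pyRange 0 (PySem.List.len tokens)).foldl
      (fun d ind => d.modify (PySem.List.pyGetD tokens ind "") [] (· ++ [ind]))
      PySem.Dict.empty).items.map pvLift = _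
  rw [pvPosItems tokens, List.map_map]
  rfl

-- B's result as the same map over the distinct words
theorem pvB_items (tokens : List String) :
    extractDocData_alt tokens
    = (PySem.Set.ofList tokens).map
        (fun w => (w, (((PySem.List.pyRange 0 (PySem.List.len tokens)).filter
            (fun ind => PySem.List.pyGetD tokens ind "" == w)).length : Int),
          (PySem.List.pyRange 0 (PySem.List.len tokens)).filter
            (fun ind => PySem.List.pyGetD tokens ind "" == w))) := by
  unfold extractDocData_alt
  rw [PySem.List.dedup_eq_ofList]
  rw [PySem.Dict.items_foldl_insert_fresh (PySem.Set.ofList tokens) (fun w => w)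
        (fun w => ((((PySem.List.pyRange 0 (PySem.List.len tokens)).filter
            (fun ind => PySem.List.pyGetD tokens ind "" == w)).length : Int),
          (PySem.List.pyRange 0 (PySem.List.len tokens)).filter
            (fun ind => PySem.List.pyGetD tokens ind "" == w)))
        PySem.Dict.empty
        (fun a _ => by simp)
        (by simp)]
  rfl

-- ===== VERDICT (by name: the statement is the Claim_ definition above) =====
theorem extractDocData_spec : Claim_equal_extractDocData := by
  intro tokens _
  unfold Spec_extractDocData
  rw [pvA_items, pvB_items]
  rfl
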